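-- pv_equiv track=rewrite | github.com/zack256/bool-tester | bool-tester/bool_tester.py | check_valid_expression
-- ===== SOURCE A (Python) =====
-- import string
--
-- ALLOWED_CHARACTERS = "()10^|*>-="
--
-- def check_valid_expression(expression):
--     # works 99% of the time!
--     open_parens = 0
--     for i in expression:
--         if i == "(":
--             open_parens += 1
--         elif i == ")":
--             open_parens -= 1
--         elif i not in string.ascii_letters and i not in ALLOWED_CHARACTERS:
--             return False
--     return open_parens == 0
-- ===== SOURCE B (Python) =====
-- import string
--
-- ALLOWED_CHARACTERS = "()10^|*>-="
--
-- def check_valid_expression(expression):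
--     # validity pass first, then compare the two paren counts independently
--     allowed = string.ascii_letters + ALLOWED_CHARACTERS
--     if any(c not in allowed for c in expression):
--         return False
--     opens = sum(1 for c in expression if c == "(")
--     closes = sum(1 for c in expression if c == ")")
--     return opens == closes
-- ===== Notes on version B (the rewrite author's own statement) =====
-- stated objective: simpler
-- what changed: Replaces A's single accumulating loop (running paren counter with early exit on invalid chars) by a separate validity pass followed by two independent paren-count passes compared for equality.
import Mathlib
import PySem

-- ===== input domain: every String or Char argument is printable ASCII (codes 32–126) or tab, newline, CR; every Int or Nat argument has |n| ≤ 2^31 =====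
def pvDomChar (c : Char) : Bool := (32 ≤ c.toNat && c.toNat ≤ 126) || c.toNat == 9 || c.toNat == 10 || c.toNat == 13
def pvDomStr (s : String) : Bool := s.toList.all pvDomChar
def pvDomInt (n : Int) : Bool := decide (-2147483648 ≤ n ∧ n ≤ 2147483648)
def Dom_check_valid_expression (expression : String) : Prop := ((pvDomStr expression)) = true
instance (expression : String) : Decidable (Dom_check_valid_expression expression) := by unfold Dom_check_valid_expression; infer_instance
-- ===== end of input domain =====

-- B splits A's single accumulating loop into a validity pass plus two independent paren-count passes (simpler decomposition; same O(n) cost).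


-- ===== PORT A =====
-- string.ascii_letters (membership of a single char in this string = list membership; exact on ASCII)
def pvLetters : List Char := "abcdefghijklmnopqrstuvwxyzABCDEFGHIJKLMNOPQRSTUVWXYZ".toList
def pvAllowed : List Char := "()10^|*>-=".toList

def pvCheckLoop : List Char → Int → Bool
  | [], openParens => openParens == 0
  | c :: rest, openParens =>
    if c == '(' then pvCheckLoop rest (openParens + 1)
    else if c == ')' then pvCheckLoop rest (openParens - 1)
    else if !(pvLetters.contains c) && !(pvAllowed.contains c) then false
    else pvCheckLoop rest openParens

def check_valid_expression (expression : String) : Bool :=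
  pvCheckLoop expression.toList 0

-- ===== PORT B =====
def check_valid_expression_alt (expression : String) : Bool :=
  let allowed := pvLetters ++ pvAllowed
  if expression.toList.any (fun c => !(allowed.contains c)) then false
  else
    let opens := expression.toList.foldl (fun n c => if c == '(' then n + 1 else n) (0 : Int)
    let closes := expression.toList.foldl (fun n c => if c == ')' then n + 1 else n) (0 : Int)
    opens == closes

-- ===== PRECONDITION & SPEC =====
def Spec_check_valid_expression (expression : String) (out : Bool) : Prop := out = check_valid_expression_alt expression
instance (expression : String) (out : Bool) : Decidable (Spec_check_valid_expression expression out) := by unfold Spec_check_valid_expression; infer_instance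

-- ===== CLAIM (what is proved, stated in full; the proofs are below) =====
def Claim_equal_check_valid_expression : Prop := ∀ (expression : String), Dom_check_valid_expression expression → Spec_check_valid_expression expression (check_valid_expression expression)

-- ===== LEMMAS AND PROOFS =====
theorem pvCheckLoop_eq (cs : List Char) : ∀ (n : Int),
    pvCheckLoop cs n =
      ((cs.all fun c => (pvLetters ++ pvAllowed).contains c) &&
        (n + (cs.count '(' : Int) - (cs.count ')' : Int) == 0)) := by
  induction cs with
  | nil => intro n; simp [pvCheckLoop]
  | cons c rest ih =>
    intro n
    by_cases h1 : c = '('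
    · subst h1
      rw [show pvCheckLoop ('(' :: rest) n = pvCheckLoop rest (n + 1) from rfl, ih,
        List.all_cons, show ((pvLetters ++ pvAllowed).contains '(') = true from by decide,
        Bool.true_and, List.count_cons_self,
        show List.count ')' ('(' :: rest) = List.count ')' rest from by
          rw [List.count_cons]; simp]
      rcases rest.all fun c => (pvLetters ++ pvAllowed).contains c with _ | _
      · simp
      · simp only [Bool.true_and]
        rw [Bool.eq_iff_iff]
        simp only [beq_iff_eq]
        push_cast
        omega
    · by_cases h2 : c = ')'
      · subst h2
        rw [show pvCheckLoop (')' :: rest) n = pvCheckLoop rest (n - 1) from rfl, ih,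
          List.all_cons, show ((pvLetters ++ pvAllowed).contains ')') = true from by decide,
          Bool.true_and, List.count_cons_self,
          show List.count '(' (')' :: rest) = List.count '(' rest from by
            rw [List.count_cons]; simp]
        rcases rest.all fun c => (pvLetters ++ pvAllowed).contains c with _ | _
        · simp
        · simp only [Bool.true_and]
          rw [Bool.eq_iff_iff]
          simp only [beq_iff_eq]
          push_cast
          omega
      · have hb1 : (c == '(') = false := by simpa using h1
        have hb2 : (c == ')') = false := by simpa using h2
        have hcnt1 : List.count '(' (c :: rest) = List.count '(' rest := by
          simp [List.count_cons, hb1]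
        have hcnt2 : List.count ')' (c :: rest) = List.count ')' rest := by
          simp [List.count_cons, hb2]
        rcases h3 : (pvLetters ++ pvAllowed).contains c with _ | _
        · have hl : (!(pvLetters.contains c) && !(pvAllowed.contains c)) = true := by
            rw [List.contains_append] at h3
            rcases Bool.or_eq_false_iff.mp h3 with ⟨hA, hB⟩
            rw [hA, hB]
            rfl
          simp only [pvCheckLoop, hb1, hb2, Bool.false_eq_true, if_false, hl, if_true,
            List.all_cons, h3, Bool.false_and]
        · have hl : (!(pvLetters.contains c) && !(pvAllowed.contains c)) = false := by
            rw [List.contains_append] at h3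
            rcases Bool.or_eq_true _ _ |>.mp h3 with hA | hA <;> rw [hA] <;> simp
          simp only [pvCheckLoop, hb1, hb2, Bool.false_eq_true, if_false, hl, ih,
            List.all_cons, h3, Bool.true_and, hcnt1, hcnt2]

theorem alt_eq (e : String) :
    check_valid_expression_alt e =
      ((e.toList.all fun c => (pvLetters ++ pvAllowed).contains c) &&
        ((0 : Int) + (e.toList.count '(' : Int) - (e.toList.count ')' : Int) == 0)) := by
  unfold check_valid_expression_alt
  simp only [PySem.List.foldl_beq_add_one, zero_add]
  rcases hall : e.toList.all fun c => (pvLetters ++ pvAllowed).contains c with _ | _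
  · have hany : (e.toList.any fun c => !((pvLetters ++ pvAllowed).contains c)) = true := by
      rcases List.all_eq_false.mp hall with ⟨x, hx, hxf⟩
      exact List.any_eq_true.mpr ⟨x, hx, by rw [eq_false_of_ne_true hxf]; rfl⟩
    simp only [hany, if_true, Bool.false_and]
  · have hany : (e.toList.any fun c => !((pvLetters ++ pvAllowed).contains c)) = false := by
      rw [List.any_eq_false]
      intro x hx
      rw [List.all_eq_true.mp hall x hx]; simp
    simp only [hany, Bool.false_eq_true, if_false, Bool.true_and]
    rw [Bool.eq_iff_iff]
    simp only [beq_iff_eq]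
    omega

-- ===== VERDICT (by name: the statement is the Claim_ definition above) =====
theorem check_valid_expression_spec : Claim_equal_check_valid_expression := by
  intro e _
  unfold Spec_check_valid_expression check_valid_expression
  rw [pvCheckLoop_eq, alt_eq]
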